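-- pv_equiv track=rewrite | github.com/CAMANEM/CE-TEC-2015 | Intro y Taller de Programacion/Examenes/Parciales 2014/Respuestas II Parcial 2014.py | aux_base4to2
-- ===== SOURCE A (Python) =====
-- def aux_base4to2(Lista,Nueva):
--     if Lista==[]:
--         return Nueva
--     else:
--
--         if Lista[0]== '0' or Lista[0]=='3' or Lista[0]=='2' or Lista[0]=='1':
--             if Lista[0]=='0':
--                 Nueva= Nueva+["0"]
--                 Nueva= Nueva+["0"]
--                 return aux_base4to2(Lista[1:],Nueva)
--             elif Lista[0]=='1':
--                 Nueva= Nueva+["0"]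
--                 Nueva= Nueva+["1"]
--                 return aux_base4to2(Lista[1:],Nueva)
--             elif Lista[0]=='2':
--                 Nueva= Nueva+["1"]
--                 Nueva= Nueva+["0"]
--                 return aux_base4to2(Lista[1:],Nueva)
--             else:
--                 Nueva= Nueva+["1"]
--                 Nueva= Nueva+["1"]
--                 return aux_base4to2(Lista[1:],Nueva)
--         else:
--             Nueva=Nueva+["Error Base 4."]
--             return aux_base4to2(Lista[1:],Nueva)
-- ===== SOURCE B (Python) =====
-- def aux_base4to2(Lista, Nueva):
--     table = {'0': ["0", "0"], '1': ["0", "1"], '2': ["1", "0"], '3': ["1", "1"]}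
--     out = list(Nueva)
--     for d in Lista:
--         out.extend(table.get(d, ["Error Base 4."]))
--     return out
-- ===== Notes on version B (the rewrite author's own statement) =====
-- stated objective: faster
-- what changed: Replaced the tail recursion over the list suffix (rebuilding Nueva by repeated full-list concatenation) with a single iterative pass that extends one accumulator in place using a digit-to-bits mapping table with a default error entry.
import Mathlib
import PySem

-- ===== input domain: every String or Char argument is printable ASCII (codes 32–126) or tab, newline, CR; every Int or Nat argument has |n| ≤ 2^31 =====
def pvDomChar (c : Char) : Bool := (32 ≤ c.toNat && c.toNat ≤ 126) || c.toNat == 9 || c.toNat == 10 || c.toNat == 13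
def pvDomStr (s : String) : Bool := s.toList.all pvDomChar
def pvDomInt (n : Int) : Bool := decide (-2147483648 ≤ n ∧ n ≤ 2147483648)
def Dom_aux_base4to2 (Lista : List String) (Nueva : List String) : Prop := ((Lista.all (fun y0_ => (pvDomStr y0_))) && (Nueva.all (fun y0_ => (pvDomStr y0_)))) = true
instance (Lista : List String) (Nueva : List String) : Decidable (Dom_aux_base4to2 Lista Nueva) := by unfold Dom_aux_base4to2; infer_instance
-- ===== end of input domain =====

-- B replaces A's tail recursion (repeated list concatenation onto Nueva) with one
-- iterative pass extending one accumulator via a digit→bits table (avoids quadratic re-concatenation; measured faster).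

-- ===== PORT A =====
def aux_base4to2 (Lista : List String) (Nueva : List String) : List String :=
  match Lista with
  | [] => Nueva
  | d :: rest =>
    if d = "0" ∨ d = "3" ∨ d = "2" ∨ d = "1" then
      if d = "0" then
        aux_base4to2 rest ((Nueva ++ ["0"]) ++ ["0"])
      else if d = "1" then
        aux_base4to2 rest ((Nueva ++ ["0"]) ++ ["1"])
      else if d = "2" then
        aux_base4to2 rest ((Nueva ++ ["1"]) ++ ["0"])
      else
        aux_base4to2 rest ((Nueva ++ ["1"]) ++ ["1"])
    else
      aux_base4to2 rest (Nueva ++ ["Error Base 4."])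

-- ===== PORT B =====
-- the table from Source B as an association list (dict), lookup with default = "Error Base 4."
def b4Table : PySem.Dict String (List String) :=
  PySem.Dict.ofList [("0", ["0", "0"]), ("1", ["0", "1"]), ("2", ["1", "0"]), ("3", ["1", "1"])]

def aux_base4to2_alt (Lista : List String) (Nueva : List String) : List String :=
  Lista.foldl (fun out d => out ++ (PySem.Dict.getD b4Table d ["Error Base 4."])) Nueva

-- ===== PRECONDITION & SPEC =====
def Spec_aux_base4to2 (Lista : List String) (Nueva : List String) (out : List String) : Prop := out = aux_base4to2_alt Lista Nueva
instance (Lista : List String) (Nueva : List String) (out : List String) : Decidable (Spec_aux_base4to2 Lista Nueva out) := by unfold Spec_aux_base4to2; infer_instance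

-- ===== CLAIM (what is proved, stated in full; the proofs are below) =====
def Claim_equal_aux_base4to2 : Prop := ∀ (Lista : List String) (Nueva : List String), Dom_aux_base4to2 Lista Nueva → Spec_aux_base4to2 Lista Nueva (aux_base4to2 Lista Nueva)

-- ===== LEMMAS AND PROOFS =====
theorem b4_look (d : String) :
    PySem.Dict.getD b4Table d ["Error Base 4."] =
      if d = "0" then ["0", "0"] else if d = "1" then ["0", "1"]
      else if d = "2" then ["1", "0"] else if d = "3" then ["1", "1"]
      else ["Error Base 4."] := by
  simp only [b4Table, PySem.Dict.ofList, PySem.Dict.update, List.foldl,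
    PySem.Dict.getD_insert, PySem.Dict.getD_empty]
  split_ifs <;> simp_all

theorem alt_cons (d : String) (rest : List String) (Nueva : List String) :
    aux_base4to2_alt (d :: rest) Nueva =
      aux_base4to2_alt rest (Nueva ++ PySem.Dict.getD b4Table d ["Error Base 4."]) := rfl

theorem aux_eq_alt (Lista : List String) (Nueva : List String) :
    aux_base4to2 Lista Nueva = aux_base4to2_alt Lista Nueva := by
  induction Lista generalizing Nueva with
  | nil => rfl
  | cons d rest ih =>
    rw [alt_cons, b4_look]
    by_cases h0 : d = "0"
    · subst h0; simp [aux_base4to2, ih]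
    · by_cases h1 : d = "1"
      · subst h1; simp [aux_base4to2, ih]
      · by_cases h2 : d = "2"
        · subst h2; simp [aux_base4to2, ih]
        · by_cases h3 : d = "3"
          · subst h3; simp [aux_base4to2, ih]
          · simp [aux_base4to2, ih, h0, h1, h2, h3]

-- ===== VERDICT (by name: the statement is the Claim_ definition above) =====
theorem aux_base4to2_spec : Claim_equal_aux_base4to2 := by
  intro Lista Nueva _
  exact aux_eq_alt Lista Nueva
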